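-- pv_equiv track=rewrite | github.com/aesthete12/GFG_Problems | Easy/Row with minimum number of 1's/row-with-minimum-number-of-1s.py | minRow
-- ===== SOURCE A (Python) =====
-- def minRow(n,m,a):
--     #code here
--
--     d={i:0 for i in range(1,n+1)}
--     for i in range(n):
--         temp=a[i].count(1)
--         d[(i+1)]=temp
--     min_v=min(d.values())
--     min_k=[k for k,v in d.items() if v==min_v]
--     return min(min_k)
-- ===== SOURCE B (Python) =====
-- def minRow(n, m, a):
--     best_i = 0
--     best_c = None
--     for i in range(n):
--         c = a[i].count(1)
--         if best_c is None or c < best_c: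
--             best_i, best_c = i + 1, c
--     return best_i
-- ===== Notes on version B (the rewrite author's own statement) =====
-- stated objective: simpler
-- what changed: Replaces A's three-stage dict pipeline (build a dict of per-row counts, take min of values, filter keys with that value, take min of keys) with one pass that keeps the best (count, row) seen so far; strict < keeps the earliest row on ties.
import Mathlib
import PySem

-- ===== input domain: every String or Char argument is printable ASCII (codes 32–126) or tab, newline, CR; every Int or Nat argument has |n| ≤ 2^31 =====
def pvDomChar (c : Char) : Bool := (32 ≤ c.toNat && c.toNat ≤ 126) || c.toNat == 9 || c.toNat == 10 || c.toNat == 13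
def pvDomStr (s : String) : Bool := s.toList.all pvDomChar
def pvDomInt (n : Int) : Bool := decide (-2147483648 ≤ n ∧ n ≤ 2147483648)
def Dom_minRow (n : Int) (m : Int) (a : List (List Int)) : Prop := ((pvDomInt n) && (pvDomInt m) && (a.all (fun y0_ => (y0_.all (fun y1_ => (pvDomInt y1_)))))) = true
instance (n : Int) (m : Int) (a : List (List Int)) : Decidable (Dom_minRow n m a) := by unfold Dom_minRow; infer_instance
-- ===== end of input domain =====

-- B replaces A's dict/min/filter/min pipeline with a single best-so-far pass (objective: simpler).

-- ===== PORT A =====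
def minRow (n : Int) (m : Int) (a : List (List Int)) : Int :=
  let d : PySem.Dict Int Int :=
    (PySem.List.pyRange 1 (n + 1) 1).foldl (fun d i => d.insert i 0) PySem.Dict.empty
  let d :=
    (PySem.List.pyRange 0 n 1).foldl (fun d i =>
      let temp := PySem.List.count (PySem.List.pyGetD a i []) 1
      d.insert (i + 1) temp) d
  let min_v := (PySem.List.min? d.values (fun v => v)).getD 0
  let min_k := (d.items.filter (fun kv => kv.2 == min_v)).map (fun kv => kv.1)
  (PySem.List.min? min_k (fun k => k)).getD 0

-- ===== PORT B =====
def minRow_alt (n : Int) (m : Int) (a : List (List Int)) : Int :=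
  ((PySem.List.pyRange 0 n 1).foldl (fun (st : Int × Option Int) i =>
      let c := PySem.List.count (PySem.List.pyGetD a i []) 1
      match st.2 with
      | none => (i + 1, some c)
      | some b => if c < b then (i + 1, some c) else st) (0, none)).1

-- ===== PRECONDITION & SPEC =====
-- Pre_ excludes exactly the inputs where A raises: n ≤ 0 (min() of empty) or n > len(a) (IndexError).
def Pre_minRow (n : Int) (m : Int) (a : List (List Int)) : Prop := 1 ≤ n ∧ n ≤ (a.length : Int)
instance (n : Int) (m : Int) (a : List (List Int)) : Decidable (Pre_minRow n m a) := by unfold Pre_minRow; infer_instance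
def pvWitness_minRow : Int × Int × List (List Int) := (2, 2, [[1, 1], [0, 1]])

def Spec_minRow (n : Int) (m : Int) (a : List (List Int)) (out : Int) : Prop := out = minRow_alt n m a
instance (n : Int) (m : Int) (a : List (List Int)) (out : Int) : Decidable (Spec_minRow n m a out) := by unfold Spec_minRow; infer_instance

-- ===== CLAIM (what is proved, stated in full; the proofs are below) =====
def Claim_equal_minRow : Prop := ∀ (n : Int) (m : Int) (a : List (List Int)), Dom_minRow n m a → Pre_minRow n m a → Spec_minRow n m a (minRow n m a)

-- ===== LEMMAS AND PROOFS =====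

-- count of 1's in row j (0-based), the value both loops compute for row j
def pvCnt (a : List (List Int)) (j : Nat) : Int := PySem.List.count (a.getD j []) 1

-- reference recursion: B's running state after the first N rows
def pvBest (a : List (List Int)) : Nat → Int × Option Int
  | 0 => (0, none)
  | Nat.succ k =>
      let c := pvCnt a k
      match (pvBest a k).2 with
      | none => ((k : Int) + 1, some c)
      | some b => if c < b then ((k : Int) + 1, some c) else pvBest a k

theorem pvBest_fold (a : List (List Int)) (N : Nat) :
    (List.range N).foldl (fun (st : Int × Option Int) (k : Nat) =>
      let c := PySem.List.count (a.getD k []) 1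
      match st.2 with
      | none => ((k : Int) + 1, some c)
      | some b => if c < b then ((k : Int) + 1, some c) else st) (0, none) = pvBest a N := by
  induction N with
  | zero => simp [pvBest]
  | succ N ih =>
      rw [List.range_succ, List.foldl_append, ih]
      simp [pvBest, pvCnt]

theorem pvAlt_eq (n : Int) (m : Int) (a : List (List Int)) :
    minRow_alt n m a = (pvBest a n.toNat).1 := by
  unfold minRow_alt
  rw [PySem.List.pyRange_one]
  simp only [zero_add, sub_zero, List.foldl_map, PySem.List.pyGetD_natCast]
  rw [pvBest_fold]

theorem pvBest_char (a : List (List Int)) (N : Nat) (h : 1 ≤ N) :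
    ∃ j : Nat, j < N ∧ pvBest a N = ((j : Int) + 1, some (pvCnt a j)) ∧
      (∀ i, i < j → pvCnt a j < pvCnt a i) ∧ (∀ i, i < N → pvCnt a j ≤ pvCnt a i) := by
  induction N with
  | zero => omega
  | succ N ih =>
      by_cases hN : 1 ≤ N
      · obtain ⟨j, hj, heq, hlt, hle⟩ := ih hN
        by_cases hc : pvCnt a N < pvCnt a j
        · refine ⟨N, by omega, ?_, ?_, ?_⟩
          · simp [pvBest, heq, hc]
          · intro i hi; exact lt_of_lt_of_le hc (hle i hi)
          · intro i hi
            rcases Nat.lt_succ_iff_lt_or_eq.mp hi with h' | h'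
            · exact le_of_lt (lt_of_lt_of_le hc (hle i h'))
            · subst h'; exact le_refl _
        · refine ⟨j, by omega, ?_, hlt, ?_⟩
          · simp [pvBest, heq, hc]
          · intro i hi
            rcases Nat.lt_succ_iff_lt_or_eq.mp hi with h' | h'
            · exact hle i h'
            · subst h'; omega
      · have hN0 : N = 0 := by omega
        subst hN0
        exact ⟨0, by omega, by simp [pvBest], by omega, fun i hi => by interval_cases i; exact le_refl _⟩

-- A's dict after the initialisation comprehension
theorem pvInit_items (n : Int) :
    ((PySem.List.pyRange 1 (n + 1) 1).foldl (fun d i => d.insert i 0) (PySem.Dict.empty : PySem.Dict Int Int)).items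
      = (List.range n.toNat).map (fun (j : Nat) => ((j : Int) + 1, (0 : Int))) := by
  rw [PySem.Dict.items_foldl_insert_fresh (k := fun i => i) (v := fun _ => (0 : Int))
        (l := PySem.List.pyRange 1 (n + 1) 1) (d := PySem.Dict.empty)
        (by intro x _; exact PySem.Dict.contains_empty x)
        (by simpa using PySem.List.nodup_pyRange_one 1 (n + 1))]
  rw [PySem.List.pyRange_one]
  simp only [add_sub_cancel_right, List.map_map, List.nil_append, PySem.Dict.empty]
  exact List.map_congr_left (fun j _ => by simp [add_comm])

-- A's dict after k iterations of the counting loop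
theorem pvLoop_items (n : Int) (a : List (List Int)) (k : Nat) (hk : (k : Int) ≤ n) :
    (((List.range k).map (fun (j : Nat) => (j : Int))).foldl (fun d i =>
        d.insert (i + 1) (PySem.List.count (PySem.List.pyGetD a i []) 1))
      ((PySem.List.pyRange 1 (n + 1) 1).foldl (fun d i => d.insert i 0) (PySem.Dict.empty : PySem.Dict Int Int))).items
      = (List.range n.toNat).map (fun (j : Nat) => ((j : Int) + 1, if j < k then pvCnt a j else 0)) := by
  induction k with
  | zero =>
      simp only [List.range_zero, List.map_nil, List.foldl_nil]
      rw [pvInit_items]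
      simp
  | succ k ih =>
      have hk' : (k : Int) ≤ n := by push_cast at hk ⊢; omega
      have hkn : k < n.toNat := by omega
      have hc : (((List.range k).map (fun (j : Nat) => (j : Int))).foldl (fun d i =>
          d.insert (i + 1) (PySem.List.count (PySem.List.pyGetD a i []) 1))
          ((PySem.List.pyRange 1 (n + 1) 1).foldl (fun d i => d.insert i 0)
            (PySem.Dict.empty : PySem.Dict Int Int))).contains ((k : Int) + 1) = true := by
        rw [PySem.Dict.contains_iff_mem_keys]
        simp only [PySem.Dict.keys, ih hk', List.map_map]
        simp only [List.mem_map, List.mem_range, Function.comp]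
        exact ⟨k, hkn, rfl⟩
      rw [List.range_succ, List.map_append, List.foldl_append]
      simp only [List.map_cons, List.map_nil, List.foldl_cons, List.foldl_nil]
      rw [PySem.Dict.items_insert_of_contains _ _ hc, ih hk', List.map_map]
      apply List.map_congr_left
      intro j hj
      simp only [List.mem_range] at hj
      by_cases hjk : j = k
      · subst hjk
        simp [pvCnt, PySem.List.pyGetD_natCast]
      · have hne : ((j : Int) + 1) ≠ ((k : Int) + 1) := by omega
        simp only [Function.comp_apply, beq_iff_eq, hne, if_false]
        congr 1
        split_ifs <;> first | rfl | omega

theorem pvA_eq (n m : Int) (a : List (List Int)) (h1 : 1 ≤ n) :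
    minRow n m a = (pvBest a n.toNat).1 := by
  have hN1 : 1 ≤ n.toNat := by omega
  obtain ⟨j, hjN, hbest, hlt, hle⟩ := pvBest_char a n.toNat hN1
  rw [hbest]
  simp only [minRow]
  rw [PySem.List.pyRange_one 0 n]
  simp only [zero_add, sub_zero]
  simp only [PySem.Dict.values]
  rw [pvLoop_items n a n.toNat (by omega)]
  have hitems : (List.range n.toNat).map (fun (j : Nat) => ((j : Int) + 1, if j < n.toNat then pvCnt a j else 0))
      = (List.range n.toNat).map (fun (j : Nat) => ((j : Int) + 1, pvCnt a j)) := by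
    apply List.map_congr_left
    intro i hi
    simp only [List.mem_range] at hi
    simp [hi]
  rw [hitems]
  simp only [List.map_map, Function.comp_def]
  have hne : (List.range n.toNat).map (fun (j' : Nat) => pvCnt a j') ≠ [] := by
    simp only [ne_eq, List.map_eq_nil_iff, List.range_eq_nil]
    omega
  cases hmv : PySem.List.min? ((List.range n.toNat).map (fun (j' : Nat) => pvCnt a j')) (fun v => v) with
  | none => exact absurd ((PySem.List.min?_eq_none_iff _ _).mp hmv) hne
  | some mv =>
    have hmvj : mv = pvCnt a j := by
      have h1' : mv ≤ pvCnt a j :=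
        PySem.List.min?_isMin hmv _ (List.mem_map.mpr ⟨j, List.mem_range.mpr hjN, rfl⟩)
      have h2' : pvCnt a j ≤ mv := by
        obtain ⟨i, hi, hieq⟩ := List.mem_map.mp (PySem.List.min?_mem hmv)
        rw [← hieq]
        exact hle i (List.mem_range.mp hi)
      omega
    rw [List.filter_map, List.map_map]
    simp only [Function.comp_def, Option.getD_some]
    have hjmem : ((j : Int) + 1) ∈ ((List.range n.toNat).filter
        (fun (j' : Nat) => (pvCnt a j' == mv))).map (fun (j' : Nat) => ((j' : Int) + 1)) := by
      refine List.mem_map.mpr ⟨j, List.mem_filter.mpr ⟨List.mem_range.mpr hjN, ?_⟩, rfl⟩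
      simp [hmvj]
    cases hx : PySem.List.min? (((List.range n.toNat).filter
        (fun (j' : Nat) => (pvCnt a j' == mv))).map (fun (j' : Nat) => ((j' : Int) + 1))) (fun k => k) with
    | none =>
      rw [(PySem.List.min?_eq_none_iff _ _).mp hx] at hjmem
      exact absurd hjmem (List.not_mem_nil)
    | some x =>
      simp only [Option.getD_some]
      have hxle : x ≤ (j : Int) + 1 := PySem.List.min?_isMin hx _ hjmem
      obtain ⟨i, hifil, hieq⟩ := List.mem_map.mp (PySem.List.min?_mem hx)
      obtain ⟨hiN, hival⟩ := List.mem_filter.mp hifil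
      have hival' : pvCnt a i = mv := by simpa using hival
      have hji : j ≤ i := by
        by_contra hcon
        have := hlt i (by omega)
        omega
      omega

-- ===== VERDICT (by name: the statement is the Claim_ definition above) =====
theorem minRow_spec : Claim_equal_minRow := by
  intro n m a _ hpre
  unfold Spec_minRow
  rw [pvA_eq n m a hpre.1, pvAlt_eq]
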